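-- pv_equiv track=rewrite | github.com/victoriahuang1/CIS-519-Final-Project | data_tools.py | create_smaller_texts
-- ===== SOURCE A (Python) =====
-- def create_smaller_texts(examples, labels, size):
--     samples = []
--     new_labels = []
--     sample = []
--     for i in range(len(examples)):
--         doc = examples[i]
--         for word in doc:
--             sample.append(word)
--             if len(sample) == size:
--                 samples.append(sample)
--                 new_labels.append(labels[i])
--                 sample = []
--     if len(sample) != 0:
--         samples.append(sample)
--         new_labels.append(labels[len(labels) - 1])
--     return samples, new_labels
-- ===== SOURCE B (Python) =====
-- def create_smaller_texts(examples, labels, size):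
--     flat = [(word, labels[i]) for i, doc in enumerate(examples) for word in doc]
--     samples = []
--     new_labels = []
--     j = 0
--     while j < len(flat):
--         chunk = flat[j:j + size]
--         samples.append([w for w, _ in chunk])
--         if len(chunk) == size:
--             new_labels.append(chunk[-1][1])
--         else:
--             new_labels.append(labels[-1])
--         j += size
--     return samples, new_labels
-- ===== Notes on version B (the rewrite author's own statement) =====
-- stated objective: alternative
-- what changed: B first flattens the documents into one list of (word, doc-label) pairs and then slices that list into size-sized chunks with a second index loop (full chunk labelled by its last pair, trailing partial chunk by labels[-1]), instead of A's single streaming pass that grows a sample accumulator word by word and flushes it when it reaches size.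
-- outside the precondition, e.g. on create_smaller_texts([['a'], ['b']], ['x'], 3): A returns ([['a', 'b']], ['x']), B raises IndexError; on create_smaller_texts([['a', 'b']], ['x'], 0): A returns ([['a', 'b']], ['x']), B raises IndexError; on create_smaller_texts([['a']], ['x'], -1): A returns ([['a']], ['x']), B does not finish within the time limit
import Mathlib
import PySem

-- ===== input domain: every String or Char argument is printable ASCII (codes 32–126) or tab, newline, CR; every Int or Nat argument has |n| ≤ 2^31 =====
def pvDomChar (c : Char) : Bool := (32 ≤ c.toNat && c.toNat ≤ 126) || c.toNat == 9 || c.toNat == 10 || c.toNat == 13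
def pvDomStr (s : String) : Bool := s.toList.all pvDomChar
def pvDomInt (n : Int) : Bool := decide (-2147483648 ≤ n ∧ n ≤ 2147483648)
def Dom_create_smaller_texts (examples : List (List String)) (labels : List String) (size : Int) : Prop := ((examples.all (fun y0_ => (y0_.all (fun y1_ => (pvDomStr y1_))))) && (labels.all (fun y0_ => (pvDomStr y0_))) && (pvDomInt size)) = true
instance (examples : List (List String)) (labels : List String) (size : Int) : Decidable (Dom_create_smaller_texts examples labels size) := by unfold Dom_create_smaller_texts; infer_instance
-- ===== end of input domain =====

-- B flattens the documents into one list of (word, doc-label) pairs and then slices it into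
-- size-sized chunks in a second loop, instead of A's streaming word-by-word accumulator; same
-- O(n) cost, different decomposition. Return values only; neither program mutates its arguments.

-- ===== PORT A =====
def create_smaller_texts (examples : List (List String)) (labels : List String) (size : Int) : List (List String) × List String :=
  -- samples, new_labels, sample — one state triple; 'for i in range(len(examples))' over pyRange
  let st := (PySem.List.pyRange 0 (examples.length : Int) 1).foldl
    (fun (st : List (List String) × List String × List String) i =>
      let doc := PySem.List.pyGetD examples i []
      doc.foldl
        (fun (st : List (List String) × List String × List String) word =>
          let sample := st.2.2 ++ [word]
          if (sample.length : Int) = size then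
            (st.1 ++ [sample], st.2.1 ++ [PySem.List.pyGetD labels i ""], [])
          else (st.1, st.2.1, sample))
        st)
    ([], [], [])
  if st.2.2.length ≠ 0 then
    (st.1 ++ [st.2.2], st.2.1 ++ [PySem.List.pyGetD labels ((labels.length : Int) - 1) ""])
  else (st.1, st.2.1)

-- ===== PORT B =====
-- Source B's 'while j < len(flat)' loop, ported with fuel (flat.length + 1 steps suffice for size ≥ 1)
def pvChunkLoop (labels : List String) (size : Int) (flat : List (String × String)) :
    Nat → Int → List (List String) × List String → List (List String) × List String
  | 0, _, acc => acc
  | fuel + 1, j, acc =>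
    if j < (flat.length : Int) then
      let chunk := PySem.List.slice flat (some j) (some (j + size))
      let samples := acc.1 ++ [chunk.map Prod.fst]
      let new_labels :=
        if (chunk.length : Int) = size then
          acc.2 ++ [(PySem.List.pyGetD chunk (-1) ("", "")).2]
        else
          acc.2 ++ [PySem.List.pyGetD labels (-1) ""]
      pvChunkLoop labels size flat fuel (j + size) (samples, new_labels)
    else acc

def create_smaller_texts_alt (examples : List (List String)) (labels : List String) (size : Int) : List (List String) × List String :=
  let flat := (PySem.List.enumerate examples 0).flatMap
    (fun p => p.2.map (fun word => (word, PySem.List.pyGetD labels p.1 "")))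
  pvChunkLoop labels size flat (flat.length + 1) 0 ([], [])

-- ===== PRECONDITION & SPEC =====
-- Pre_ keeps the natural domain: a positive chunk size — except when there are no words at all,
-- where any size is fine — (on size ≤ 0 with words present A accidentally lumps all words into one
-- chunk while B raises IndexError or loops forever) and a label for every document that contains a
-- word (otherwise A raises IndexError on labels[i]/labels[-1] whenever a chunk is emitted in an
-- unlabeled document, and B raises IndexError building the flat list).
def Pre_create_smaller_texts (examples : List (List String)) (labels : List String) (size : Int) : Prop :=
  (1 ≤ size ∨ ∀ d ∈ examples, d = []) ∧ ∀ d ∈ examples.drop labels.length, d = []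
instance (examples : List (List String)) (labels : List String) (size : Int) : Decidable (Pre_create_smaller_texts examples labels size) := by unfold Pre_create_smaller_texts; infer_instance

def pvWitness_create_smaller_texts : List (List String) × List String × Int :=
  ([["a", "b"], ["c"]], ["x", "y"], 2)

def Spec_create_smaller_texts (examples : List (List String)) (labels : List String) (size : Int) (out : List (List String) × List String) : Prop := out = create_smaller_texts_alt examples labels size
instance (examples : List (List String)) (labels : List String) (size : Int) (out : List (List String) × List String) : Decidable (Spec_create_smaller_texts examples labels size out) := by unfold Spec_create_smaller_texts; infer_instance

-- ===== CLAIM (what is proved, stated in full; the proofs are below) =====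
def Claim_equal_create_smaller_texts : Prop := ∀ (examples : List (List String)) (labels : List String) (size : Int), Dom_create_smaller_texts examples labels size → Pre_create_smaller_texts examples labels size → Spec_create_smaller_texts examples labels size (create_smaller_texts examples labels size)

-- ===== LEMMAS AND PROOFS =====

-- the common word-at-a-time step, on (word, label) pairs
def pvStep (size : Int) (st : List (List String) × List String × List String) (p : String × String) :
    List (List String) × List String × List String :=
  let sample := st.2.2 ++ [p.1]
  if (sample.length : Int) = size then (st.1 ++ [sample], st.2.1 ++ [p.2], []) else (st.1, st.2.1, sample)

-- A's trailing flush
def pvFinish (labels : List String) (st : List (List String) × List String × List String) :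
    List (List String) × List String :=
  if st.2.2.length ≠ 0 then (st.1 ++ [st.2.2], st.2.1 ++ [PySem.List.pyGetD labels (-1) ""])
  else (st.1, st.2.1)

-- reference chunking: consume k+1 pairs at a time
def pvChunks (labels : List String) (k : Nat) : List (String × String) → List (List String) × List String
  | [] => ([], [])
  | p :: t =>
    let c := (p :: t).take (k + 1)
    let rest := pvChunks labels k ((p :: t).drop (k + 1))
    (c.map Prod.fst :: rest.1,
      (if c.length = k + 1 then (PySem.List.pyGetD c (-1) ("", "")).2
       else PySem.List.pyGetD labels (-1) "") :: rest.2)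
  termination_by l => l.length
  decreasing_by simp

-- labels[len(labels)-1] and labels[-1] read the same element (both the last; both default on [])
lemma pv_lastD (labels : List String) :
    PySem.List.pyGetD labels ((labels.length : Int) - 1) "" = PySem.List.pyGetD labels (-1) "" := by
  cases labels with
  | nil => decide
  | cons a t => simp [pysem, PySem.List.pyGetD, PySem.List.pyGet?, PySem.List.pyIdx?]

lemma pvStep_flush (k : Nat) (S : List (List String)) (L s) (p : String × String) (h : s.length = k) :
    pvStep ((k : Int) + 1) (S, L, s) p = (S ++ [s ++ [p.1]], L ++ [p.2], []) := by
  simp only [pvStep]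
  rw [if_pos (by simp [h])]

lemma pvStep_keep (k : Nat) (S : List (List String)) (L s) (p : String × String) (h : s.length ≠ k) :
    pvStep ((k : Int) + 1) (S, L, s) p = (S, L, s ++ [p.1]) := by
  simp only [pvStep]
  rw [if_neg (by simp; omega)]

-- a too-short block just extends the pending sample
lemma pv_fold_partial (k : Nat) (c : List (String × String)) :
    ∀ (s : List String) (S : List (List String)) (L : List String),
      s.length + c.length ≤ k →
      c.foldl (pvStep ((k : Int) + 1)) (S, L, s) = (S, L, s ++ c.map Prod.fst) := by
  induction c with
  | nil => intro s S L _; simp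
  | cons p t ih =>
    intro s S L h
    rw [List.foldl_cons, pvStep_keep k S L s p (by simp at h; omega),
        ih (s ++ [p.1]) S L (by simp at h ⊢; omega)]
    simp

-- a block completing the sample to k+1 pairs flushes exactly at its last element
lemma pv_fold_full (k : Nat) (t : List (String × String)) :
    ∀ (p : String × String) (s : List String) (S : List (List String)) (L : List String),
      s.length + (p :: t).length = k + 1 →
      (p :: t).foldl (pvStep ((k : Int) + 1)) (S, L, s) =
        (S ++ [s ++ (p :: t).map Prod.fst], L ++ [(PySem.List.pyGetD (p :: t) (-1) ("", "")).2], []) := by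
  induction t with
  | nil =>
    intro p s S L h
    simp at h
    rw [List.foldl_cons, pvStep_flush k S L s p (by omega), List.foldl_nil]
    simp [PySem.List.pyGetD, PySem.List.pyGet?, PySem.List.pyIdx?]
  | cons q u ih =>
    intro p s S L h
    rw [List.foldl_cons, pvStep_keep k S L s p (by simp at h; omega),
        ih q (s ++ [p.1]) S L (by simp at h ⊢; omega)]
    have hg : PySem.List.pyGetD (q :: u) (-1) ("", "") = PySem.List.pyGetD (p :: q :: u) (-1) ("", "") := by
      simp [PySem.List.pyGetD, PySem.List.pyGet?, PySem.List.pyIdx?]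
      rfl
    simp [hg]

-- unfold lemmas for pvChunks
lemma pvChunks_nil (labels : List String) (k : Nat) : pvChunks labels k [] = ([], []) := by
  rw [pvChunks]

lemma pvChunks_cons (labels : List String) (k : Nat) (p : String × String) (t : List (String × String)) :
    pvChunks labels k (p :: t) =
      ((((p :: t).take (k + 1)).map Prod.fst) :: (pvChunks labels k ((p :: t).drop (k + 1))).1,
       (if ((p :: t).take (k + 1)).length = k + 1 then
          (PySem.List.pyGetD ((p :: t).take (k + 1)) (-1) ("", "")).2
        else PySem.List.pyGetD labels (-1) "") :: (pvChunks labels k ((p :: t).drop (k + 1))).2) := by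
  rw [pvChunks]

-- the streaming fold plus trailing flush computes pvChunks
lemma pv_fold_chunks (labels : List String) (k : Nat) :
    ∀ (n : Nat) (l : List (String × String)), l.length ≤ n →
      ∀ (S : List (List String)) (L : List String),
        pvFinish labels (l.foldl (pvStep ((k : Int) + 1)) (S, L, [])) =
          (S ++ (pvChunks labels k l).1, L ++ (pvChunks labels k l).2) := by
  intro n
  induction n with
  | zero =>
    intro l hl S L
    have : l = [] := by cases l <;> simp_all
    subst this
    simp [pvChunks_nil, pvFinish]
  | succ n ih =>
    intro l hl S L
    cases l with
    | nil => simp [pvChunks_nil, pvFinish]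
    | cons p t =>
      by_cases hlen : (p :: t).length ≤ k
      · -- one trailing partial chunk
        rw [pv_fold_partial k (p :: t) [] S L (by simpa using hlen)]
        rw [pvChunks_cons]
        have hc : (p :: t).take (k + 1) = p :: t := List.take_of_length_le (by simp at hlen ⊢; omega)
        have hd : (p :: t).drop (k + 1) = [] := List.drop_of_length_le (by simp at hlen ⊢; omega)
        rw [hc, hd, pvChunks_nil, if_neg (by simp at hlen ⊢; omega)]
        simp [pvFinish]
      · -- a full chunk of k+1 pairs, then recurse
        have hlen' : k < t.length + 1 := by simpa using not_le.mp hlen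
        have hsplit : p :: t = (p :: t).take (k + 1) ++ (p :: t).drop (k + 1) :=
          (List.take_append_drop _ _).symm
        have htake : (p :: t).take (k + 1) = p :: t.take k := by simp
        conv_lhs => rw [hsplit]
        rw [List.foldl_append, htake,
            pv_fold_full k (t.take k) p [] S L (by simp; omega)]
        rw [ih ((p :: t).drop (k + 1)) (by simp at hl ⊢; omega)]
        rw [pvChunks_cons, htake, if_pos (by simp; omega)]
        simp

-- the slicing while-loop computes pvChunks
lemma pv_loop_chunks (labels : List String) (k : Nat) (flat : List (String × String)) :
    ∀ (fuel j : Nat) (S : List (List String)) (L : List String),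
      flat.length - j < fuel →
      pvChunkLoop labels ((k : Int) + 1) flat fuel (j : Int) (S, L) =
        (S ++ (pvChunks labels k (flat.drop j)).1, L ++ (pvChunks labels k (flat.drop j)).2) := by
  intro fuel
  induction fuel with
  | zero => intro j S L h; omega
  | succ fuel ih =>
    intro j S L h
    by_cases hj : j < flat.length
    · rw [pvChunkLoop]
      rw [if_pos (by exact_mod_cast hj)]
      have hslice : PySem.List.slice flat (some (j : Int)) (some ((j : Int) + ((k : Int) + 1))) =
          (flat.drop j).take (k + 1) := by
        have hcast : ((j : Int) + ((k : Int) + 1)) = (j : Int) + ((k + 1 : Nat) : Int) := by push_cast; ring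
        rw [hcast, PySem.List.slice_natCast_add]
      rw [hslice]
      have hstep : ((j : Int) + ((k : Int) + 1)) = (((j + (k + 1) : Nat)) : Int) := by push_cast; ring
      rw [hstep, ih (j + (k + 1)) _ _ (by omega)]
      obtain ⟨p, t, hpt⟩ : ∃ p t, flat.drop j = p :: t := by
        cases hdj : flat.drop j with
        | nil => exact absurd (List.drop_eq_nil_iff.mp hdj) (by omega)
        | cons p t => exact ⟨p, t, rfl⟩
      have hdd : flat.drop (j + (k + 1)) = (flat.drop j).drop (k + 1) := by
        rw [List.drop_drop]
      rw [hdd, hpt, pvChunks_cons]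
      by_cases hfull : ((p :: t).take (k + 1)).length = k + 1
      · rw [if_pos (by exact_mod_cast hfull), if_pos hfull]
        simp
      · rw [if_neg (by exact_mod_cast hfull), if_neg hfull]
        simp
    · rw [pvChunkLoop]
      rw [if_neg (by simp; omega)]
      rw [List.drop_of_length_le (by omega), pvChunks_nil]
      simp

-- A's nested document loop is the streaming fold over the flat pair list
lemma pv_A_eq_flat_fold (examples : List (List String)) (labels : List String) (size : Int) :
    create_smaller_texts examples labels size =
      pvFinish labels
        (((PySem.List.enumerate examples 0).flatMap
            (fun p => p.2.map (fun word => (word, PySem.List.pyGetD labels p.1 "")))).foldl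
          (pvStep size) ([], [], [])) := by
  simp only [create_smaller_texts, pvFinish, pv_lastD]
  rw [PySem.List.enumerate_eq_map_pyRange examples ([] : List String)]
  simp only [List.foldl_flatMap, List.foldl_map]
  rfl

-- with no words at all, both programs return ([], []) whatever size is
lemma pv_empty (examples : List (List String)) (labels : List String) (size : Int)
    (h : ∀ d ∈ examples, d = []) :
    create_smaller_texts examples labels size = ([], []) ∧
      create_smaller_texts_alt examples labels size = ([], []) := by
  have hflat : (PySem.List.enumerate examples 0).flatMap
      (fun p => p.2.map (fun word => (word, PySem.List.pyGetD labels p.1 ""))) = [] := by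
    rw [List.flatMap_eq_nil_iff]
    intro p hp
    obtain ⟨kk, hk, rfl⟩ := (PySem.List.mem_enumerate_iff _ _ _).mp hp
    simp [h _ (List.getElem_mem hk)]
  constructor
  · rw [pv_A_eq_flat_fold, hflat]
    simp [pvFinish]
  · simp only [create_smaller_texts_alt, hflat]
    rw [pvChunkLoop]
    simp

-- ===== VERDICT (by name: the statement is the Claim_ definition above) =====
theorem create_smaller_texts_spec : Claim_equal_create_smaller_texts := by
  intro examples labels size _ hpre
  unfold Spec_create_smaller_texts
  rcases hpre.1 with h1 | hempty
  case inr =>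
    obtain ⟨hA, hB⟩ := pv_empty examples labels size hempty
    rw [hA, hB]
  obtain ⟨k, rfl⟩ : ∃ k : Nat, size = (k : Int) + 1 := ⟨(size - 1).toNat, by omega⟩
  rw [pv_A_eq_flat_fold]
  simp only [create_smaller_texts_alt]
  set flat := (PySem.List.enumerate examples 0).flatMap
    (fun p => p.2.map (fun word => (word, PySem.List.pyGetD labels p.1 ""))) with hflat
  rw [pv_fold_chunks labels k flat.length flat le_rfl]
  have hl := pv_loop_chunks labels k flat (flat.length + 1) 0 [] [] (by omega)
  simp only [Nat.cast_zero, List.drop_zero, List.nil_append] at hl ⊢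
  exact hl.symm
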